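-- pv_equiv track=rewrite | github.com/dwalone/WordleSolver | main.py | pickRandomWord
-- ===== SOURCE A (Python) =====
-- def pickRandomWord(word_list) -> str:
--     alphabet_dict = {char: 0 for char in 'abcdefghijklmnopqrstuvwxyz'}
--
--     for word in word_list:
--         for char in word:
--             if char in alphabet_dict:
--                 alphabet_dict[char] += 1
--
--     word_scores = {}
--
--     for word in word_list:
--         score = sum([alphabet_dict[char] for char in word])
--         word_scores[word] = score
--
--     def repeated_letters(w):
--         """Return the number of repeated letters in a word."""
--         return len(w) - len(set(w))
--
--     # Progressively allow repeated letters
--     threshold = 0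
--     filtered_words = []
--
--     while not filtered_words and threshold <= len(word_list[0]):
--         filtered_words = [word for word in word_list if repeated_letters(word) <= threshold]
--         threshold += 1
--
--     # Sort the filtered words by score
--     sorted_filtered_words = sorted(filtered_words, key=lambda x: word_scores[x], reverse=True)
--
--     # The word with the highest score from the filtered list
--     return sorted_filtered_words[0]
-- ===== SOURCE B (Python) =====
-- def pickRandomWord(word_list) -> str:
--     freq = {char: 0 for char in 'abcdefghijklmnopqrstuvwxyz'}
--
--     for word in word_list:
--         for char in word:
--             if char in freq:
--                 freq[char] += 1
--
--     # One pass: keep the first word minimizing (repeated letters, -score).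
--     best = None
--     for word in word_list:
--         key = (len(word) - len(set(word)), -sum(freq[char] for char in word))
--         if best is None or key < best[0]:
--             best = (key, word)
--     return best[1]
-- ===== Notes on version B (the rewrite author's own statement) =====
-- stated objective: simpler
-- what changed: A's progressive-threshold while loop plus a stable reverse sort of the surviving words is replaced by a single pass that keeps the first word minimizing the lexicographic pair (repeated letters, -score).
import Mathlib
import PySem

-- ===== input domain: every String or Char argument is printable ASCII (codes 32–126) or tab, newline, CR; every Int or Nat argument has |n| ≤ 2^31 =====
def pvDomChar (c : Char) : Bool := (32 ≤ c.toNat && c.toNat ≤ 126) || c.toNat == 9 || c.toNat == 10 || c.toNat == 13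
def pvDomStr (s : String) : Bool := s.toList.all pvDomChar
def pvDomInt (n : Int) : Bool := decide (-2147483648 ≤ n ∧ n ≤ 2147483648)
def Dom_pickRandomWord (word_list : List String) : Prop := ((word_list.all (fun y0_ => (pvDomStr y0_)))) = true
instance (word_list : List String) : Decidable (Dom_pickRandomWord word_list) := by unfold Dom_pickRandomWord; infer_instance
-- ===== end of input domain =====

-- B replaces A's progressive-threshold while loop plus stable reverse sort by a single pass
-- keeping the first word minimizing the pair (repeated letters, -score); objective: simpler.

-- ===== PORT A =====
-- helper 'repeated_letters' of the Python: len(w) - len(set(w))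
def pvRepeated (w : String) : Int :=
  PySem.Str.len w - ((PySem.Set.ofList w.toList).length : Int)

-- the 'while not filtered_words and threshold <= len(word_list[0])' loop of A
def pickWhile (word_list : List String) (threshold bound : Int) : List String :=
  if _h : threshold ≤ bound then
    let filtered := word_list.filter (fun word => decide (pvRepeated word ≤ threshold))
    if filtered.isEmpty then pickWhile word_list (threshold + 1) bound else filtered
  else []
termination_by (bound + 1 - threshold).toNat
decreasing_by omega

def pickRandomWord (word_list : List String) : String :=
  let alphabet_dict : PySem.Dict Char Int :=
    ("abcdefghijklmnopqrstuvwxyz".toList).foldl (fun d char => d.insert char 0) PySem.Dict.empty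
  let alphabet_dict : PySem.Dict Char Int :=
    word_list.foldl (fun d word =>
      word.toList.foldl (fun d char =>
        if d.contains char then d.modify char 0 (· + 1) else d) d) alphabet_dict
  -- alphabet_dict[char] raises KeyError on a char outside a–z; Pre_ excludes that,
  -- so the total form getD is exact on the admitted inputs
  let word_scores : PySem.Dict String Int :=
    word_list.foldl (fun ws word =>
      ws.insert word ((word.toList.map (fun char => alphabet_dict.getD char 0)).sum)) PySem.Dict.empty
  -- word_list[0] raises IndexError on []; Pre_ excludes the empty list
  let bound : Int := PySem.Str.len (PySem.List.pyGetD word_list 0 "")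
  let filtered_words := pickWhile word_list 0 bound
  let sorted_filtered_words :=
    PySem.List.sorted filtered_words (fun x => word_scores.getD x 0) true
  -- sorted_filtered_words[0]: IndexError only on [], excluded by Pre_
  PySem.List.pyGetD sorted_filtered_words 0 ""

-- ===== PORT B =====
def pickRandomWord_alt (word_list : List String) : String :=
  let freq : PySem.Dict Char Int :=
    ("abcdefghijklmnopqrstuvwxyz".toList).foldl (fun d char => d.insert char 0) PySem.Dict.empty
  let freq : PySem.Dict Char Int :=
    word_list.foldl (fun d word =>
      word.toList.foldl (fun d char =>
        if d.contains char then d.modify char 0 (· + 1) else d) d) freq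
  -- freq[char] raises KeyError outside a–z, excluded by Pre_: getD is exact there
  let best : Option ((Int × Int) × String) :=
    word_list.foldl (fun best word =>
      let key : Int × Int :=
        (PySem.Str.len word - ((PySem.Set.ofList word.toList).length : Int),
         -((word.toList.map (fun char => freq.getD char 0)).sum))
      match best with
      | none => some (key, word)
      | some (bk, bw) =>
          -- Python tuple '<' is lexicographic
          if key.1 < bk.1 ∨ (key.1 = bk.1 ∧ key.2 < bk.2) then some (key, word)
          else some (bk, bw)) none
  -- best[1] with best = None raises TypeError on the empty list, excluded by Pre_
  (best.map (·.2)).getD ""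

-- ===== PRECONDITION & SPEC =====
-- Pre_ excludes exactly the inputs where A raises: the empty list (IndexError on
-- word_list[0]) and any word containing a character outside 'a'..'z' (KeyError in
-- the score computation).
def Pre_pickRandomWord (word_list : List String) : Prop :=
  word_list ≠ [] ∧ ∀ w ∈ word_list, (w.toList.all (fun c => 'a' ≤ c && c ≤ 'z')) = true
instance (word_list : List String) : Decidable (Pre_pickRandomWord word_list) := by
  unfold Pre_pickRandomWord; infer_instance

def pvWitness_pickRandomWord : List String := ["crane", "pears", "apple"]

def Spec_pickRandomWord (word_list : List String) (out : String) : Prop := out = pickRandomWord_alt word_list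
instance (word_list : List String) (out : String) : Decidable (Spec_pickRandomWord word_list out) := by unfold Spec_pickRandomWord; infer_instance

-- ===== CLAIM (what is proved, stated in full; the proofs are below) =====
def Claim_equal_pickRandomWord : Prop := ∀ (word_list : List String), Dom_pickRandomWord word_list → Pre_pickRandomWord word_list → Spec_pickRandomWord word_list (pickRandomWord word_list)

-- ===== LEMMAS AND PROOFS =====

-- the letter-frequency dict both programs build, and the resulting score of a word
def pvFreq (word_list : List String) : PySem.Dict Char Int :=
  word_list.foldl (fun d word =>
    word.toList.foldl (fun d char =>
      if d.contains char then d.modify char 0 (· + 1) else d) d)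
    (("abcdefghijklmnopqrstuvwxyz".toList).foldl (fun d char => d.insert char 0) PySem.Dict.empty)

def pvScore (word_list : List String) (w : String) : Int :=
  (w.toList.map (fun char => (pvFreq word_list).getD char 0)).sum

-- lexicographic key B minimizes
def pvK (word_list : List String) (w : String) : Lex (Int × Int) :=
  toLex (pvRepeated w, -(pvScore word_list w))

-- 1. word_scores lookup: value depends only on the key, so duplicates are harmless
theorem pv_getD_foldl_insert_not_mem (l : List String) (f : String → Int)
    (d : PySem.Dict String Int) (w : String) (hw : w ∉ l) :
    (l.foldl (fun d x => d.insert x (f x)) d).getD w 0 = d.getD w 0 := by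
  induction l generalizing d with
  | nil => rfl
  | cons x xs ih =>
      simp only [List.foldl_cons]
      rw [ih _ (fun h => hw (List.mem_cons_of_mem _ h)),
        PySem.Dict.getD_insert]
      simp only [List.mem_cons, not_or] at hw
      simp [hw.1]

theorem pv_getD_foldl_insert (l : List String) (f : String → Int)
    (d : PySem.Dict String Int) (w : String) (hw : w ∈ l) :
    (l.foldl (fun d x => d.insert x (f x)) d).getD w 0 = f w := by
  induction l generalizing d with
  | nil => cases hw
  | cons x xs ih =>
      simp only [List.foldl_cons]
      by_cases hx : w ∈ xs
      · exact ih _ hx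
      · have : w = x := by
          rcases List.mem_cons.mp hw with h | h
          · exact h
          · exact absurd h hx
        subst this
        rw [pv_getD_foldl_insert_not_mem _ _ _ _ hx, PySem.Dict.getD_insert]
        simp

-- 2. running-first-min fold = first element with key ≤ the minimum M
theorem pv_firstMin_eq_find? {α β : Type} [LinearOrder β] (K : α → β) (dflt : α) :
    ∀ (l : List α) (x : α) (M : β), (∀ z ∈ x :: l, M ≤ K z) → (∃ z ∈ x :: l, K z ≤ M) →
    l.foldl (fun b w => if K w < K b then w else b) x
      = ((x :: l).find? (fun y => decide (K y ≤ M))).getD dflt := by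
  intro l
  induction l with
  | nil =>
      intro x M hM hex
      rcases hex with ⟨z, hz, hzM⟩
      simp only [List.mem_singleton] at hz; subst hz
      simp [List.find?, hzM]
  | cons a l ih =>
      intro x M hM hex
      simp only [List.foldl_cons]
      by_cases hax : K a < K x
      · rw [if_pos hax]
        have hMa : M ≤ K a := hM a (by simp)
        have hxn : ¬ (K x ≤ M) := by
          intro h; exact absurd (lt_of_lt_of_le hax (le_trans h hMa)) (lt_irrefl _)
        have hex' : ∃ z ∈ a :: l, K z ≤ M := by
          rcases hex with ⟨z, hz, hzM⟩
          rcases List.mem_cons.mp hz with h | h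
          · subst h; exact absurd hzM hxn
          · exact ⟨z, h, hzM⟩
        rw [ih a M (fun z hz => hM z (List.mem_cons_of_mem _ hz)) hex']
        simp [List.find?, hxn]
      · rw [if_neg hax]
        have hxa : K x ≤ K a := le_of_not_gt hax
        have hM' : ∀ z ∈ x :: l, M ≤ K z := fun z hz => hM z (by
          rcases List.mem_cons.mp hz with h | h
          · simp [h]
          · simp [h])
        have hex' : ∃ z ∈ x :: l, K z ≤ M := by
          rcases hex with ⟨z, hz, hzM⟩
          rcases List.mem_cons.mp hz with h | h
          · exact ⟨x, by simp, h ▸ hzM⟩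
          · rcases List.mem_cons.mp h with h2 | h2
            · exact ⟨x, by simp, le_trans hxa (h2 ▸ hzM)⟩
            · exact ⟨z, by simp [h2], hzM⟩
        rw [ih x M hM' hex']
        by_cases hx : K x ≤ M
        · simp [List.find?, hx]
        · have ha : ¬ (K a ≤ M) := fun h => hx (le_trans hxa h)
          simp [List.find?, hx, ha]

-- 3. head of python's stable reverse sort = running-first-max fold
theorem pv_head_insertBy_fold {α κ : Type} [LinearOrder κ] (key : α → κ) :
    ∀ (l : List α) (h : α) (t : List α),
      ((l.foldl (fun a x => PySem.List.insertBy (fun a b => decide (key b < key a)) x a) (h :: t)).head?)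
        = some (l.foldl (fun b w => if key b < key w then w else b) h) := by
  intro l
  induction l with
  | nil => intro h t; rfl
  | cons a l ih =>
      intro h t
      simp only [List.foldl_cons]
      by_cases hha : key h < key a
      · have : PySem.List.insertBy (fun a b => decide (key b < key a)) a (h :: t)
            = a :: h :: t := by simp [PySem.List.insertBy, hha]
        rw [this, ih, if_pos hha]
      · have : PySem.List.insertBy (fun a b => decide (key b < key a)) a (h :: t)
            = h :: PySem.List.insertBy (fun a b => decide (key b < key a)) a t := by
          simp [PySem.List.insertBy, hha]
        rw [this, ih, if_neg hha]

theorem pv_head_sorted_rev {α κ : Type} [LinearOrder κ] (key : α → κ) (f : α) (fs : List α) :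
    (PySem.List.sorted (f :: fs) key true).head?
      = some (fs.foldl (fun b w => if key b < key w then w else b) f) := by
  rw [PySem.List.sorted_rev_eq_foldl_insertBy]
  simp only [List.foldl_cons]
  have h0 : PySem.List.insertBy (fun a b => decide (key b < key a)) f ([] : List α) = [f] := rfl
  rw [h0, pv_head_insertBy_fold]

-- first-max fold only looks at keys of list members
theorem pv_firstMax_congr {α κ : Type} [LinearOrder κ] (k1 k2 : α → κ) :
    ∀ (l : List α) (x : α), (∀ w ∈ x :: l, k1 w = k2 w) →
      l.foldl (fun b w => if k1 b < k1 w then w else b) x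
        = l.foldl (fun b w => if k2 b < k2 w then w else b) x := by
  intro l
  induction l with
  | nil => intro x _; rfl
  | cons a l ih =>
      intro x h
      simp only [List.foldl_cons]
      rw [h x (by simp), h a (by simp)]
      split_ifs
      · exact ih a (fun w hw => h w (by
          rcases List.mem_cons.mp hw with h1 | h1
          · simp [h1]
          · simp [h1]))
      · exact ih x (fun w hw => h w (by
          rcases List.mem_cons.mp hw with h1 | h1
          · simp [h1]
          · simp [h1]))

-- 4. the while loop returns the words whose repeat count equals the minimum m
theorem pv_pickWhile_eq (wl : List String) (bound m : Int)
    (hmin : ∀ w ∈ wl, m ≤ pvRepeated w) (hex : ∃ w ∈ wl, pvRepeated w = m)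
    (hmb : m ≤ bound) :
    ∀ (k : Nat) (t : Int), t ≤ m → (m - t).toNat = k →
      pickWhile wl t bound = wl.filter (fun w => decide (pvRepeated w ≤ m)) := by
  intro k
  induction k with
  | zero =>
      intro t htm hk
      have heq : t = m := by omega
      subst heq
      rw [pickWhile, dif_pos hmb]
      have hne : ¬ ((wl.filter (fun w => decide (pvRepeated w ≤ t))).isEmpty = true) := by
        rcases hex with ⟨w, hw, hwm⟩
        have hmem : w ∈ wl.filter (fun w => decide (pvRepeated w ≤ t)) :=
          List.mem_filter.mpr ⟨hw, by simp [hwm]⟩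
        rw [List.isEmpty_iff]
        intro h
        rw [h] at hmem; cases hmem
      simp only [if_neg hne]
  | succ k ih =>
      intro t htm hk
      have htlt : t < m := by omega
      rw [pickWhile, dif_pos (by omega)]
      have hempty : (wl.filter (fun w => decide (pvRepeated w ≤ t))).isEmpty := by
        rw [List.isEmpty_iff, List.filter_eq_nil_iff]
        intro w hw
        simp only [decide_eq_true_eq, not_le]
        exact lt_of_lt_of_le htlt (hmin w hw)
      simp only [if_pos hempty]
      exact ih (t + 1) (by omega) (by omega)

-- find? with pointwise-equal predicates on members, and find? through a filter
theorem pv_find?_congr {α : Type} (p q : α → Bool) :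
    ∀ (l : List α), (∀ x ∈ l, p x = q x) → l.find? p = l.find? q := by
  intro l
  induction l with
  | nil => intro _; rfl
  | cons a l ih =>
      intro h
      simp only [List.find?]
      rw [h a (by simp)]
      cases q a
      · exact ih (fun x hx => h x (by simp [hx]))
      · rfl

theorem pv_find?_filter {α : Type} (p q : α → Bool) :
    ∀ (l : List α), (l.filter p).find? q = l.find? (fun x => p x && q x) := by
  intro l
  induction l with
  | nil => rfl
  | cons a l ih =>
      by_cases hp : p a = true
      · rw [List.filter_cons, if_pos hp]
        by_cases hq : q a = true
        · rw [List.find?_cons_of_pos hq, List.find?_cons_of_pos (by simp [hp, hq])]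
        · have hq' : q a = false := by simpa using hq
          rw [List.find?_cons_of_neg (by simp [hq']), List.find?_cons_of_neg (by simp [hp, hq'])]
          exact ih
      · have hp' : p a = false := by simpa using hp
        rw [List.filter_cons, if_neg hp, List.find?_cons_of_neg (by simp [hp'])]
        exact ih

-- B's option fold is the running-first-min fold over pvK
theorem pv_B_fold (wl : List String) :
    ∀ (l : List String) (b : String),
      l.foldl (fun best word =>
        let key : Int × Int :=
          (PySem.Str.len word - ((PySem.Set.ofList word.toList).length : Int),
           -((word.toList.map (fun char => (pvFreq wl).getD char 0)).sum))
        match best with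
        | none => some (key, word)
        | some (bk, bw) =>
            if key.1 < bk.1 ∨ (key.1 = bk.1 ∧ key.2 < bk.2) then some (key, word)
            else some (bk, bw)) (some ((pvRepeated b, -(pvScore wl b)), b))
      = some ((pvRepeated (l.foldl (fun b w => if pvK wl w < pvK wl b then w else b) b),
               -(pvScore wl (l.foldl (fun b w => if pvK wl w < pvK wl b then w else b) b))),
              l.foldl (fun b w => if pvK wl w < pvK wl b then w else b) b) := by
  intro l
  induction l with
  | nil => intro b; rfl
  | cons a l ih =>
      intro b
      simp only [List.foldl_cons]
      have hcond : (PySem.Str.len a - ((PySem.Set.ofList a.toList).length : Int) < pvRepeated b ∨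
          (PySem.Str.len a - ((PySem.Set.ofList a.toList).length : Int) = pvRepeated b ∧
            -((a.toList.map (fun char => (pvFreq wl).getD char 0)).sum) < -(pvScore wl b)))
          ↔ pvK wl a < pvK wl b := by
        rw [pvK, pvK, Prod.Lex.lt_iff]
        simp [pvRepeated, pvScore]
      by_cases h : pvK wl a < pvK wl b
      · simp only [← hcond] at h
        simp only [if_pos h]
        have h2 : pvK wl a < pvK wl b := hcond.mp h
        rw [show (PySem.Str.len a - ((PySem.Set.ofList a.toList).length : Int)) = pvRepeated a from rfl,
          show -((a.toList.map (fun char => (pvFreq wl).getD char 0)).sum) = -(pvScore wl a) from rfl,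
          ih a, if_pos h2]
      · simp only [← hcond] at h
        simp only [if_neg h]
        have h2 : ¬ (pvK wl a < pvK wl b) := fun hh => h (hcond.mpr hh)
        rw [ih b, if_neg h2]

def pvKsc (wl : List String) (w : String) : Int := -(pvScore wl w)

theorem pv_repeated_nonneg (w : String) : 0 ≤ pvRepeated w := by
  have h := PySem.Set.length_ofList_le w.toList
  rw [pvRepeated, PySem.Str.len_eq]
  omega

-- ===== VERDICT (by name: the statement is the Claim_ definition above) =====
theorem pickRandomWord_spec : Claim_equal_pickRandomWord := by
  unfold Claim_equal_pickRandomWord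
  intro wl _hdom hpre
  unfold Spec_pickRandomWord
  obtain ⟨hne, -⟩ := hpre
  obtain ⟨w0, rest, rfl⟩ : ∃ w0 rest, wl = w0 :: rest := by
    cases wl with
    | nil => exact absurd rfl hne
    | cons a l => exact ⟨a, l, rfl⟩
  -- the minimum repeat count mR
  have hminfacts := PySem.List.foldl_min_le (rest.map pvRepeated) (pvRepeated w0)
  set mR := (rest.map pvRepeated).foldl min (pvRepeated w0) with hmRdef
  have hmin : ∀ w ∈ w0 :: rest, mR ≤ pvRepeated w := by
    intro w hw
    rcases List.mem_cons.mp hw with h | h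
    · exact h ▸ hminfacts.1
    · exact hminfacts.2 (pvRepeated w) (by simp only [List.mem_map]; exact ⟨w, h, rfl⟩)
  have hexm : ∃ w ∈ w0 :: rest, pvRepeated w = mR := by
    rcases PySem.List.foldl_min_mem (rest.map pvRepeated) (pvRepeated w0) with h | h
    · exact ⟨w0, by simp, h.symm⟩
    · rcases List.mem_map.mp h with ⟨w, hw, hwe⟩
      exact ⟨w, by simp [hw], hwe⟩
  have h0m : 0 ≤ mR := by
    rcases hexm with ⟨w, _, hw⟩
    rw [← hw]; exact pv_repeated_nonneg w
  have hmb : mR ≤ PySem.Str.len w0 := by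
    have h1 : mR ≤ pvRepeated w0 := hmin w0 (by simp)
    have h2 := PySem.Set.length_ofList_le w0.toList
    rw [pvRepeated, PySem.Str.len_eq] at h1
    rw [PySem.Str.len_eq]
    omega
  -- the while loop returns the filter at mR
  have hwhile : pickWhile (w0 :: rest) 0 (PySem.Str.len w0)
      = (w0 :: rest).filter (fun w => decide (pvRepeated w ≤ mR)) :=
    pv_pickWhile_eq _ _ mR hmin hexm hmb mR.toNat 0 h0m (by omega)
  have hFne : (w0 :: rest).filter (fun w => decide (pvRepeated w ≤ mR)) ≠ [] := by
    rcases hexm with ⟨w, hw, hwm⟩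
    intro h
    have hmem : w ∈ (w0 :: rest).filter (fun w => decide (pvRepeated w ≤ mR)) :=
      List.mem_filter.mpr ⟨hw, by simp [hwm]⟩
    rw [h] at hmem; cases hmem
  obtain ⟨f0, fs, hF⟩ := List.exists_cons_of_ne_nil hFne
  have hFmem : ∀ w ∈ f0 :: fs, w ∈ w0 :: rest := by
    intro w hw
    rw [← hF] at hw
    exact (List.mem_filter.mp hw).1
  have hFrep : ∀ w ∈ f0 :: fs, pvRepeated w = mR := by
    intro w hw
    have h1 := (List.mem_filter.mp (hF ▸ hw)).2
    exact le_antisymm (by simpa using h1) (hmin w (hFmem w hw))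
  -- the minimum MF of pvKsc over the filtered list
  have hKfacts := PySem.List.foldl_min_le (fs.map (pvKsc (w0 :: rest))) (pvKsc (w0 :: rest) f0)
  set MF := (fs.map (pvKsc (w0 :: rest))).foldl min (pvKsc (w0 :: rest) f0) with hMFdef
  have hKmin : ∀ z ∈ f0 :: fs, MF ≤ pvKsc (w0 :: rest) z := by
    intro z hz
    rcases List.mem_cons.mp hz with h | h
    · exact h ▸ hKfacts.1
    · exact hKfacts.2 _ (by simp only [List.mem_map]; exact ⟨z, h, rfl⟩)
  have hKex : ∃ z ∈ f0 :: fs, pvKsc (w0 :: rest) z = MF := by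
    rcases PySem.List.foldl_min_mem (fs.map (pvKsc (w0 :: rest))) (pvKsc (w0 :: rest) f0) with h | h
    · exact ⟨f0, by simp, h.symm⟩
    · rcases List.mem_map.mp h with ⟨z, hz, hze⟩
      exact ⟨z, by simp [hz], hze⟩
  -- ===== A-side =====
  have hA0 : pickRandomWord (w0 :: rest)
      = PySem.List.pyGetD
          (PySem.List.sorted
            (pickWhile (w0 :: rest) 0 (PySem.Str.len (PySem.List.pyGetD (w0 :: rest) 0 "")))
            (fun x => ((w0 :: rest).foldl
              (fun ws word => ws.insert word (pvScore (w0 :: rest) word)) PySem.Dict.empty).getD x 0)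
            true) 0 "" := rfl
  rw [PySem.List.pyGetD_zero_cons, hwhile, hF] at hA0
  have hhead := pv_head_sorted_rev
    (fun x => ((w0 :: rest).foldl
      (fun ws word => ws.insert word (pvScore (w0 :: rest) word)) PySem.Dict.empty).getD x 0) f0 fs
  have hfold1 : fs.foldl (fun b w =>
        if ((w0 :: rest).foldl (fun ws word => ws.insert word (pvScore (w0 :: rest) word)) PySem.Dict.empty).getD b 0
          < ((w0 :: rest).foldl (fun ws word => ws.insert word (pvScore (w0 :: rest) word)) PySem.Dict.empty).getD w 0
        then w else b) f0
      = fs.foldl (fun b w => if pvScore (w0 :: rest) b < pvScore (w0 :: rest) w then w else b) f0 :=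
    pv_firstMax_congr _ _ fs f0
      (fun w hw => pv_getD_foldl_insert _ _ _ _ (hFmem w hw))
  have hfold2 : fs.foldl (fun b w => if pvScore (w0 :: rest) b < pvScore (w0 :: rest) w then w else b) f0
      = fs.foldl (fun b w => if pvKsc (w0 :: rest) w < pvKsc (w0 :: rest) b then w else b) f0 := by
    have heq : (fun (b w : String) => if pvScore (w0 :: rest) b < pvScore (w0 :: rest) w then w else b)
        = (fun b w => if pvKsc (w0 :: rest) w < pvKsc (w0 :: rest) b then w else b) := by
      funext b w
      by_cases hc : pvScore (w0 :: rest) b < pvScore (w0 :: rest) w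
      · rw [if_pos hc, if_pos (show pvKsc (w0 :: rest) w < pvKsc (w0 :: rest) b by
          rw [pvKsc, pvKsc]; omega)]
      · rw [if_neg hc, if_neg (show ¬ (pvKsc (w0 :: rest) w < pvKsc (w0 :: rest) b) by
          rw [pvKsc, pvKsc]; omega)]
    rw [heq]
  have hAfind : fs.foldl (fun b w => if pvKsc (w0 :: rest) w < pvKsc (w0 :: rest) b then w else b) f0
      = ((f0 :: fs).find? (fun y => decide (pvKsc (w0 :: rest) y ≤ MF))).getD "" := by
    apply pv_firstMin_eq_find? (pvKsc (w0 :: rest)) "" fs f0 MF hKmin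
    rcases hKex with ⟨z, hz, hze⟩
    exact ⟨z, hz, le_of_eq hze⟩
  rw [hfold1, hfold2, hAfind] at hhead
  cases hsrt : PySem.List.sorted (f0 :: fs)
      (fun x => ((w0 :: rest).foldl
        (fun ws word => ws.insert word (pvScore (w0 :: rest) word)) PySem.Dict.empty).getD x 0) true with
  | nil =>
      exact absurd ((PySem.List.sorted_eq_nil_iff _ _ _).mp hsrt) (by simp)
  | cons v t =>
      rw [hsrt] at hhead
      simp only [List.head?_cons, Option.some.injEq] at hhead
      rw [hsrt, PySem.List.pyGetD_zero_cons] at hA0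
      -- ===== B-side =====
      have hB0 : pickRandomWord_alt (w0 :: rest)
          = ((rest.foldl (fun best word =>
              let key : Int × Int :=
                (PySem.Str.len word - ((PySem.Set.ofList word.toList).length : Int),
                 -((word.toList.map (fun char => (pvFreq (w0 :: rest)).getD char 0)).sum))
              match best with
              | none => some (key, word)
              | some (bk, bw) =>
                  if key.1 < bk.1 ∨ (key.1 = bk.1 ∧ key.2 < bk.2) then some (key, word)
                  else some (bk, bw))
              (some ((pvRepeated w0, -(pvScore (w0 :: rest) w0)), w0))).map (·.2)).getD "" := rfl
      rw [pv_B_fold (w0 :: rest) rest w0] at hB0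
      simp only [Option.map_some, Option.getD_some] at hB0
      have hMlex : ∀ z ∈ w0 :: rest, (toLex (mR, MF) : Lex (Int × Int)) ≤ pvK (w0 :: rest) z := by
        intro z hz
        have h1 := hmin z hz
        rcases lt_or_eq_of_le h1 with h | h
        · rw [pvK]
          apply le_of_lt
          rw [Prod.Lex.lt_iff]
          left
          simpa using h
        · have hzF : z ∈ f0 :: fs := by
            rw [← hF]
            exact List.mem_filter.mpr ⟨hz, by simp [← h]⟩
          have h2 := hKmin z hzF
          rw [pvK, Prod.Lex.le_iff]
          right
          refine ⟨by simpa using h, ?_⟩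
          simpa [pvKsc] using h2
      have hexlex : ∃ z ∈ w0 :: rest, pvK (w0 :: rest) z ≤ toLex (mR, MF) := by
        rcases hKex with ⟨f, hfF, hfe⟩
        refine ⟨f, hFmem f hfF, ?_⟩
        rw [pvK, Prod.Lex.le_iff]
        right
        refine ⟨by simpa using hFrep f hfF, ?_⟩
        rw [show -(pvScore (w0 :: rest) f) = pvKsc (w0 :: rest) f from rfl, hfe]
        simp
      have hBfind : rest.foldl (fun b w => if pvK (w0 :: rest) w < pvK (w0 :: rest) b then w else b) w0
          = ((w0 :: rest).find? (fun y => decide (pvK (w0 :: rest) y ≤ toLex (mR, MF)))).getD "" :=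
        pv_firstMin_eq_find? (pvK (w0 :: rest)) "" rest w0 (toLex (mR, MF)) hMlex hexlex
      -- ===== transfer =====
      have htrans : ((w0 :: rest).find? (fun y => decide (pvK (w0 :: rest) y ≤ toLex (mR, MF))))
          = ((f0 :: fs).find? (fun y => decide (pvKsc (w0 :: rest) y ≤ MF))) := by
        rw [← hF, pv_find?_filter]
        apply pv_find?_congr
        intro y hy
        have h1 := hmin y hy
        by_cases h : pvRepeated y = mR
        · simp [pvK, pvKsc, Prod.Lex.le_iff, h]
        · have h2 : mR < pvRepeated y := lt_of_le_of_ne h1 (Ne.symm h)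
          simp [pvK, pvKsc, Prod.Lex.le_iff, h, not_le.mpr h2, not_lt.mpr h1]
      rw [hA0, hhead, hB0, hBfind, htrans]
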